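-- pv_equiv track=rewrite | github.com/SUKRUCIRIS/RSA_python | rsa.py | producekeys
-- ===== SOURCE A (Python) =====
-- def pgcd(nombres_):
-- 	nombres=nombres_.copy()
-- 	if not type(nombres) is list:
-- 		return None
-- 	if len(nombres)==0:
-- 		return None
-- 	for i in range(len(nombres)):
-- 		if nombres[i]<0:
-- 			nombres[i]=-nombres[i]
-- 		if nombres[i]==0:
-- 			return None
-- 	min_n=nombres[0]
-- 	for n in nombres:
-- 		if min_n>n:
-- 			min_n=n
-- 	for i in range(int(min_n),0,-1):
-- 		found=True
-- 		for n in nombres: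
-- 			if n%i!=0:
-- 				found=False
-- 				break
-- 		if found==True:
-- 			return i
-- 	return None
--
-- def producekeys(primenumber1,primenumber2):
-- 	N=primenumber1*primenumber2
-- 	T=(primenumber1-1)*(primenumber2-1)
-- 	e=0
-- 	d=0
-- 	for i in range(T-1,1,-1):
-- 		if pgcd([i,T])==1 and pgcd([i,N])==1:
-- 			e=i
-- 			break
-- 	d=e+T
-- 	return (e,N),(d,N)
-- ===== SOURCE B (Python) =====
-- def _gcd(a, b):
--     # Euclid's algorithm; with nonnegative inputs returns gcd(a, b) (gcd(a,0)=a).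
--     while b:
--         a, b = b, a % b
--     return a
--
-- def producekeys(primenumber1, primenumber2):
--     N = primenumber1 * primenumber2
--     T = (primenumber1 - 1) * (primenumber2 - 1)
--     Tabs = abs(T)
--     Nabs = abs(N)
--     e = 0
--     i = T - 1
--     while i >= 2:
--         if _gcd(Tabs, i) == 1 and _gcd(Nabs, i) == 1:
--             e = i
--             break
--         i -= 1
--     d = e + T
--     return (e, N), (d, N)
-- ===== Notes on version B (the rewrite author's own statement) =====
-- stated objective: faster
-- what changed: Replaces A's per-candidate pgcd (abs pass, min, then a trial countdown from min testing every divisor) by Euclid's gcd on precomputed abs(T) and abs(N), keeping the same descending candidate scan.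
import Mathlib
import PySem

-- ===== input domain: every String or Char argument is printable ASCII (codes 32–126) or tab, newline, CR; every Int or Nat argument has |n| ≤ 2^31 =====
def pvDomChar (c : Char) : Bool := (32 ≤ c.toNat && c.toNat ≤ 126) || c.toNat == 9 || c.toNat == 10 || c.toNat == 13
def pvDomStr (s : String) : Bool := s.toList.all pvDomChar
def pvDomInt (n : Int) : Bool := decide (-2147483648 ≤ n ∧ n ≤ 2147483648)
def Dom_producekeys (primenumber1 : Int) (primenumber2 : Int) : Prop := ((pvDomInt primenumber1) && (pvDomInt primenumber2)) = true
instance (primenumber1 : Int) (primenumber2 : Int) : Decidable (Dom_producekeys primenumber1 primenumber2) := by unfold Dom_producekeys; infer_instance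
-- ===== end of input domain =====

-- B replaces A's per-candidate countdown-gcd (pgcd) by Euclid's algorithm on precomputed |T|, |N|; same return value.

-- ===== PORT A =====
-- pgcd's abs/zero pass: 'if nombres[i]<0: negate; if nombres[i]==0: return None'
def pgcdAbs : List Int → Option (List Int)
  | [] => some []
  | x :: xs =>
    if (if x < 0 then -x else x) = 0 then none
    else (pgcdAbs xs).map (fun r => (if x < 0 then -x else x) :: r)

-- pgcd's countdown 'for i in range(int(min_n),0,-1)': fuel k+1 is the current i
def pgcdScan (nombres : List Int) : Nat → Option Int
  | 0 => none
  | Nat.succ k =>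
    if nombres.all (fun n => PySem.Int.mod n ((k + 1 : Nat) : Int) == 0) then some ((k + 1 : Nat) : Int)
    else pgcdScan nombres k

-- 'type(nombres) is list' always holds for a Lean List argument, so that branch is omitted
def pgcd (nombres_ : List Int) : Option Int :=
  if nombres_.length = 0 then none
  else
    match pgcdAbs nombres_ with
    | none => none
    | some nombres =>
        pgcdScan nombres
          ((nombres.foldl (fun m n => if m > n then n else m) nombres.headI).toNat)

-- 'for i in range(T-1,1,-1)': fuel = number of remaining iterations, i the current candidate
def searchA (Tv Nv : Int) : Int → Nat → Int
  | _, 0 => 0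
  | i, Nat.succ fuel =>
    if pgcd [i, Tv] == some 1 && pgcd [i, Nv] == some 1 then i
    else searchA Tv Nv (i - 1) fuel

def producekeys (primenumber1 : Int) (primenumber2 : Int) : (Int × Int) × (Int × Int) :=
  let N := primenumber1 * primenumber2
  let T := (primenumber1 - 1) * (primenumber2 - 1)
  let e := searchA T N (T - 1) (T - 2).toNat
  let d := e + T
  ((e, N), (d, N))

-- ===== PORT B =====
-- _gcd: 'while b: a, b = b, a % b; return a'
def gcdB (a b : Int) : Int :=
  if hb : b = 0 then a else gcdB b (PySem.Int.mod a b)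
termination_by b.natAbs
decreasing_by
  rcases (lt_or_gt_of_ne hb) with hneg | hpos
  · have h := PySem.Int.mod_neg_bounds a hneg
    omega
  · have h1 := PySem.Int.mod_nonneg a hpos
    have h2 := PySem.Int.mod_lt a hpos
    omega

-- 'while i >= 2: if _gcd(Tabs,i)==1 and _gcd(Nabs,i)==1: e=i; break; i -= 1'
def searchB (Tabs Nabs : Int) (i : Int) : Int :=
  if h : 2 ≤ i then
    if gcdB Tabs i == 1 && gcdB Nabs i == 1 then i
    else searchB Tabs Nabs (i - 1)
  else 0
termination_by i.toNat
decreasing_by omega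

def producekeys_alt (primenumber1 : Int) (primenumber2 : Int) : (Int × Int) × (Int × Int) :=
  let N := primenumber1 * primenumber2
  let T := (primenumber1 - 1) * (primenumber2 - 1)
  let e := searchB |T| |N| (T - 1)
  let d := e + T
  ((e, N), (d, N))

-- ===== PRECONDITION & SPEC =====
def Spec_producekeys (primenumber1 : Int) (primenumber2 : Int) (out : (Int × Int) × (Int × Int)) : Prop := out = producekeys_alt primenumber1 primenumber2
instance (primenumber1 : Int) (primenumber2 : Int) (out : (Int × Int) × (Int × Int)) : Decidable (Spec_producekeys primenumber1 primenumber2 out) := by unfold Spec_producekeys; infer_instance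

-- ===== CLAIM (what is proved, stated in full; the proofs are below) =====
def Claim_equal_producekeys : Prop := ∀ (primenumber1 : Int) (primenumber2 : Int), Dom_producekeys primenumber1 primenumber2 → Spec_producekeys primenumber1 primenumber2 (producekeys primenumber1 primenumber2)

-- ===== LEMMAS AND PROOFS =====

lemma pgcdScan_pair_eq_one_iff (a b : Int) (ha : 1 ≤ a) (hb : 1 ≤ b) (k : Nat) :
    pgcdScan [a, b] k = some 1 ↔
      1 ≤ k ∧ ∀ j : Nat, 2 ≤ j → j ≤ k → ¬(((j : Int) ∣ a) ∧ ((j : Int) ∣ b)) := by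
  induction k with
  | zero => simp [pgcdScan]
  | succ k ih =>
    have hall : ([a, b].all (fun n => PySem.Int.mod n ((k + 1 : Nat) : Int) == 0)) = true ↔
        (((k + 1 : Nat) : Int) ∣ a ∧ ((k + 1 : Nat) : Int) ∣ b) := by
      simp [List.all]
    rw [pgcdScan]
    by_cases hc : ((k + 1 : Nat) : Int) ∣ a ∧ ((k + 1 : Nat) : Int) ∣ b
    · rw [if_pos (hall.mpr hc)]
      constructor
      · intro h
        have hk0 : k = 0 := by
          have := Option.some.inj h
          omega
        subst hk0
        exact ⟨le_refl 1, by intro j h2 h1; omega⟩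
      · rintro ⟨-, hP⟩
        rcases Nat.eq_zero_or_pos k with hk0 | hk1
        · subst hk0; norm_num
        · exact absurd hc (hP (k + 1) (by omega) (le_refl _))
    · rw [if_neg (by simp only [hall]; exact hc)]
      have hk1 : 1 ≤ k := by
        by_contra hk
        have : k = 0 := by omega
        subst this
        exact hc (by norm_num)
      rw [ih]
      constructor
      · rintro ⟨-, hP⟩
        refine ⟨by omega, fun j h2 hj => ?_⟩
        rcases Nat.lt_or_ge j (k + 1) with hlt | hge
        · exact hP j h2 (by omega)
        · have : j = k + 1 := by omega
          subst this
          exact hc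
      · rintro ⟨-, hP⟩
        exact ⟨hk1, fun j h2 hj => hP j h2 (by omega)⟩

lemma gcd_eq_one_iff_no_common (i b : Int) (k : Nat) (hi : 2 ≤ i) (hb : 1 ≤ b)
    (h1 : 1 ≤ k) (hgk : (Int.gcd i b : Int) ≤ (k : Int)) :
    (1 ≤ k ∧ ∀ j : Nat, 2 ≤ j → j ≤ k → ¬(((j : Int) ∣ i) ∧ ((j : Int) ∣ b))) ↔
      Int.gcd i b = 1 := by
  constructor
  · rintro ⟨-, hP⟩
    by_contra hg
    have hg0 : Int.gcd i b ≠ 0 := by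
      intro h0
      rw [Int.gcd_eq_zero_iff] at h0
      omega
    have hg2 : 2 ≤ Int.gcd i b := by omega
    have hk : Int.gcd i b ≤ k := by exact_mod_cast hgk
    exact hP (Int.gcd i b) hg2 hk ⟨Int.gcd_dvd_left i b, Int.gcd_dvd_right i b⟩
  · intro hg
    refine ⟨h1, fun j h2 hj ⟨d1, d2⟩ => ?_⟩
    have hdg : (j : Int) ∣ (Int.gcd i b : Int) := by exact_mod_cast Int.dvd_gcd d1 d2
    rw [hg] at hdg
    have : (j : Int) ≤ 1 := Int.le_of_dvd one_pos hdg
    omega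

lemma pgcdAbs_pair (i m : Int) (hi : 2 ≤ i) (hm : m ≠ 0) :
    pgcdAbs [i, m] = some [i, |m|] := by
  simp only [pgcdAbs]
  have hi' : (if i < 0 then -i else i) = i := if_neg (by omega)
  rw [hi', if_neg (show ¬ i = 0 by omega)]
  have : (if m < 0 then -m else m) = |m| := by
    rcases lt_or_ge m 0 with h | h
    · rw [if_pos h, abs_of_neg h]
    · rw [if_neg (by omega), abs_of_nonneg h]
  rw [this, if_neg (by have := abs_pos.mpr hm; omega)]
  simp

lemma pgcd_pair (i m : Int) (hi : 2 ≤ i) (hm : m ≠ 0) :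
    pgcd [i, m] = pgcdScan [i, |m|] ((if i > |m| then |m| else i).toNat) := by
  rw [pgcd, if_neg (by simp), pgcdAbs_pair i m hi hm]
  simp [List.foldl, List.headI]

lemma pgcd_zero (i : Int) (hi : 2 ≤ i) : pgcd [i, 0] = none := by
  rw [pgcd, if_neg (by simp)]
  have : pgcdAbs [i, (0 : Int)] = none := by
    simp only [pgcdAbs]
    rw [if_neg (by omega)]
    simp
  rw [this]

lemma gcdB_eq_gcd (n : Nat) : ∀ a b : Int, 0 ≤ a → 0 ≤ b → b.natAbs ≤ n →
    gcdB a b = ((Int.gcd a b : Nat) : Int) := by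
  induction n with
  | zero =>
    intro a b ha hb hn
    have hb0 : b = 0 := by omega
    subst hb0
    rw [gcdB, dif_pos rfl]
    rw [Int.gcd_zero_right, Int.natAbs_of_nonneg ha]
  | succ n ih =>
    intro a b ha hb hn
    rw [gcdB]
    split_ifs with h
    · subst h
      rw [Int.gcd_zero_right, Int.natAbs_of_nonneg ha]
    · have hbpos : 0 < b := by omega
      have hm1 := PySem.Int.mod_nonneg a hbpos
      have hm2 := PySem.Int.mod_lt a hbpos
      rw [ih b _ hb hm1 (by omega)]
      congr 1
      rw [PySem.Int.mod_eq_emod_of_pos hbpos]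
      rw [Int.gcd_comm a b]
      simp only [Int.gcd]
      obtain ⟨m, rfl⟩ := Int.eq_ofNat_of_zero_le ha
      obtain ⟨n, rfl⟩ := Int.eq_ofNat_of_zero_le hb
      rw [← Int.natCast_emod]
      simp only [Int.natAbs_natCast]
      rw [Nat.gcd_comm n (m % n), ← Nat.gcd_rec]

lemma factor_eq (i m : Int) (hi : 2 ≤ i) :
    (pgcd [i, m] == some 1) = (gcdB |m| i == 1) := by
  have hBg : gcdB |m| i = ((Int.gcd i m : Nat) : Int) := by
    rw [gcdB_eq_gcd i.natAbs |m| i (abs_nonneg m) (by omega) (by omega)]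
    congr 1
    rw [Int.gcd_comm]
    simp only [Int.gcd, Int.natAbs_abs]
  by_cases hm : m = 0
  · subst hm
    rw [pgcd_zero i hi]
    rw [Bool.eq_iff_iff]
    simp only [beq_iff_eq, hBg]
    constructor
    · intro h; exact absurd h (by simp)
    · intro h
      exfalso
      have : Int.gcd i 0 = i.natAbs := Int.gcd_zero_right i
      rw [this] at h
      omega
  · rw [pgcd_pair i m hi hm]
    have hb : 1 ≤ |m| := by have := abs_pos.mpr hm; omega
    have hg1 : (Int.gcd i |m| : Int) ∣ i := Int.gcd_dvd_left i |m|
    have hg2 : (Int.gcd i |m| : Int) ∣ |m| := Int.gcd_dvd_right i |m|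
    have hgi : (Int.gcd i |m| : Int) ≤ i := Int.le_of_dvd (by omega) hg1
    have hgb : (Int.gcd i |m| : Int) ≤ |m| := Int.le_of_dvd (by omega) hg2
    rw [Bool.eq_iff_iff]
    simp only [beq_iff_eq]
    rw [pgcdScan_pair_eq_one_iff i |m| (by omega) hb]
    rw [gcd_eq_one_iff_no_common i |m| _ hi hb (by split <;> omega) (by split <;> omega)]
    have : Int.gcd i |m| = Int.gcd i m := by simp [Int.gcd, Int.natAbs_abs]
    rw [this, hBg]
    constructor
    · intro h; exact_mod_cast congrArg (fun n : Nat => (n : Int)) h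
    · intro h; exact_mod_cast h

lemma search_eq (Tv Nv : Int) : ∀ (f : Nat) (i : Int), f = (i - 1).toNat →
    searchA Tv Nv i f = searchB |Tv| |Nv| i := by
  intro f
  induction f with
  | zero =>
    intro i h
    rw [searchA, searchB, dif_neg (by omega)]
  | succ f ih =>
    intro i h
    have hi : 2 ≤ i := by omega
    rw [searchA, searchB, dif_pos hi]
    rw [factor_eq i Tv hi, factor_eq i Nv hi]
    split
    · rfl
    · exact ih (i - 1) (by omega)

-- ===== VERDICT (by name: the statement is the Claim_ definition above) =====
theorem producekeys_spec : Claim_equal_producekeys := by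
  intro p1 p2 _
  unfold Spec_producekeys producekeys producekeys_alt
  simp only []
  rw [search_eq ((p1 - 1) * (p2 - 1)) (p1 * p2) (((p1 - 1) * (p2 - 1)) - 2).toNat
      (((p1 - 1) * (p2 - 1)) - 1) (by omega)]
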